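-- pv_equiv track=rewrite | github.com/jeongdonggi/baekjoonstudy | 프로그래머스/2/42587. 프로세스/프로세스.py | solution
-- ===== SOURCE A (Python) =====
-- from collections import deque
--
-- def solution(priorities, location):
--     answer = 0
--     queue = deque([(i, p) for i, p in enumerate(priorities)])
--
--     while queue:
--         if queue[0][1] == max(queue, key=lambda x: x[1])[1]:
--             key, value = queue.popleft()
--             answer += 1
--             if key == location:
--                 return answer
--         else:
--             queue.append(queue.popleft())
--
--     return answer
-- ===== SOURCE B (Python) =====
-- def solution(priorities, location):
--     answer = 0
--     queue = list(enumerate(priorities))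
--     while queue:
--         top = max(p for _, p in queue)
--         j = next(i for i, (_, p) in enumerate(queue) if p == top)
--         answer += 1
--         if queue[j][0] == location:
--             return answer
--         queue = queue[j + 1:] + queue[:j]
--     return answer
-- ===== Notes on version B (the rewrite author's own statement) =====
-- stated objective: faster
-- what changed: Instead of rotating the deque one element at a time and recomputing max(queue) at every rotation, B locates the first highest-priority document with a single scan per printed document and continues on suffix+prefix of the list.
import Mathlib
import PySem

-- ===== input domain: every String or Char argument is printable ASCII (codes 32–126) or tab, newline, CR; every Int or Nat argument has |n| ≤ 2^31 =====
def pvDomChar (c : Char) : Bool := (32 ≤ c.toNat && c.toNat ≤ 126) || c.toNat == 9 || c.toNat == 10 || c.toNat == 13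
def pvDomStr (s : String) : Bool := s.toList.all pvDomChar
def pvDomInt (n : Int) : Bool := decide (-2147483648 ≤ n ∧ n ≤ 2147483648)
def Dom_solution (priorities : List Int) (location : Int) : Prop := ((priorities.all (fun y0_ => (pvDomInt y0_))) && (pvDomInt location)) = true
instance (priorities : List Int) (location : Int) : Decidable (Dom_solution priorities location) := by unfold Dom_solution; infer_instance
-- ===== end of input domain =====

-- B replaces A's one-step deque rotation (which recomputes max(queue) at every rotation) by a single
-- scan per printed document locating the first highest-priority document; equivalence of return values is proved.

-- ===== PORT A =====
-- the while-loop of A: queue of (index, priority) pairs, rotating; terminates because a pop shrinks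
-- the queue and a rotation moves the first maximal-priority element one step closer to the front.
def loopA (location : Int) : List (Int × Int) → Int → Int
  | [], answer => answer
  | (k, v) :: rest, answer =>
    match hm : PySem.List.max? ((k, v) :: rest) (fun x => x.2) with
    | none => answer   -- unreachable: the queue is nonempty
    | some m =>
      if v == m.2 then
        if k == location then answer + 1 else loopA location rest (answer + 1)
      else loopA location (rest ++ [(k, v)]) answer
  termination_by q _ => (q.length, q.findIdx (fun y => decide (∀ z ∈ q, z.2 ≤ y.2)))
  decreasing_by
  · exact Prod.Lex.left _ _ (by simp)
  · rename_i hne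
    have hmem := PySem.List.max?_mem hm
    have hub := PySem.List.max?_isMax hm
    have hvne : v ≠ m.2 := by simpa using hne
    have hmrest : m ∈ rest := by
      rcases List.mem_cons.1 hmem with h | h
      · exact absurd (congrArg Prod.snd h.symm) (by simpa using hvne)
      · exact h
    -- the two findIdx predicates agree pointwise (same members on both sides)
    have hp : (fun y : Int × Int => decide (∀ z ∈ rest ++ [(k, v)], z.2 ≤ y.2))
        = (fun y : Int × Int => decide (∀ z ∈ (k, v) :: rest, z.2 ≤ y.2)) := by
      funext y; simp only [decide_eq_decide, List.mem_append, List.mem_cons]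
      constructor <;> intro h z hz
      · exact h z (by tauto)
      · exact h z (by tauto)
    have hpm : (fun y : Int × Int => decide (∀ z ∈ (k, v) :: rest, z.2 ≤ y.2)) m = true := by
      simpa using hub
    have hpk : (fun y : Int × Int => decide (∀ z ∈ (k, v) :: rest, z.2 ≤ y.2)) (k, v) = false := by
      simp only [decide_eq_false_iff_not]
      intro h
      exact absurd (le_antisymm (by simpa using hub (k, v) (by simp)) (h m hmem)) hvne
    have hlt : rest.findIdx (fun y => decide (∀ z ∈ (k, v) :: rest, z.2 ≤ y.2)) < rest.length :=
      List.findIdx_lt_length.2 ⟨m, hmrest, hpm⟩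
    rw [hp]
    apply Prod.Lex.right'
    · simp
    · have hck : (decide (∀ z ∈ (k, v) :: rest, z.2 ≤ ((k, v) : Int × Int).2)) = false := by
        simpa using hpk
      rw [List.findIdx_append, if_pos hlt, List.findIdx_cons, hck]
      simp

def solution (priorities : List Int) (location : Int) : Int :=
  loopA location (PySem.List.enumerate priorities 0) 0

-- ===== PORT B =====
-- the while-loop of B: find the max priority, jump to its first holder, pop it, continue with suffix++prefix.
def loopB (location : Int) : List (Int × Int) → Int → Int
  | [], answer => answer
  | x :: rest, answer =>
    match hm : PySem.List.max? ((x :: rest).map (fun y => y.2)) (fun y => y) with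
    | none => answer   -- unreachable: the queue is nonempty
    | some top =>
      let j := (x :: rest).findIdx (fun y => y.2 == top)
      match PySem.List.pyGet? (x :: rest) (j : Int) with
      | none => answer   -- unreachable: j is a valid index
      | some d =>
        if d.1 == location then answer + 1
        else loopB location
          (PySem.List.slice (x :: rest) (some ((j : Int) + 1)) none ++
           PySem.List.slice (x :: rest) none (some (j : Int))) (answer + 1)
  termination_by q _ => q.length
  decreasing_by
    have hjlt : j < (x :: rest).length := by
      have htop : top ∈ (x :: rest).map (fun y => y.2) := by
        simpa using PySem.List.max?_mem hm
      rcases List.mem_map.1 htop with ⟨y, hy, hyt⟩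
      exact List.findIdx_lt_length.2 ⟨y, hy, by simp [hyt]⟩
    have h1 : PySem.List.slice (x :: rest) (some ((j : Int) + 1)) none = (x :: rest).drop (j + 1) := by
      have := PySem.List.slice_from_natCast (x :: rest) (j + 1)
      simpa [Nat.cast_add] using this
    have h2 : PySem.List.slice (x :: rest) none (some (j : Int)) = (x :: rest).take j :=
      PySem.List.slice_to_natCast (x :: rest) j
    rw [h1, h2]
    simp only [List.length_append, List.length_drop, List.length_take]
    omega

def solution_alt (priorities : List Int) (location : Int) : Int :=
  loopB location (PySem.List.enumerate priorities 0) 0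

-- ===== PRECONDITION & SPEC =====
def Spec_solution (priorities : List Int) (location : Int) (out : Int) : Prop := out = solution_alt priorities location
instance (priorities : List Int) (location : Int) (out : Int) : Decidable (Spec_solution priorities location out) := by unfold Spec_solution; infer_instance

-- ===== CLAIM (what is proved, stated in full; the proofs are below) =====
def Claim_equal_solution : Prop := ∀ (priorities : List Int) (location : Int), Dom_solution priorities location → Spec_solution priorities location (solution priorities location)

-- ===== LEMMAS AND PROOFS =====

theorem pv_max_id_eq (l : List Int) (t : Int) (ht : t ∈ l) (hub : ∀ y ∈ l, y ≤ t) :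
    PySem.List.max? l (fun y => y) = some t := by
  cases l with
  | nil => cases ht
  | cons a tl =>
    rw [PySem.List.max?_id_cons]
    have h1 := PySem.List.le_foldl_max tl a
    have h2 := PySem.List.foldl_max_mem tl a
    have hle : tl.foldl max a ≤ t := by
      rcases h2 with h | h
      · rw [h]; exact hub a (by simp)
      · exact hub _ (by simp [h])
    have hge : t ≤ tl.foldl max a := by
      rcases List.mem_cons.1 ht with h | h
      · rw [h]; exact h1.1
      · exact h1.2 t h
    rw [le_antisymm hle hge]



theorem loopB_cons (loc : Int) (x : Int × Int) (rest : List (Int × Int)) (ans : Int)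
    (t : Int) (j : Nat) (d : Int × Int)
    (hmax : PySem.List.max? ((x :: rest).map (fun y => y.2)) (fun y => y) = some t)
    (hj : (x :: rest).findIdx (fun y => y.2 == t) = j)
    (hd : (x :: rest)[j]? = some d) :
    loopB loc (x :: rest) ans =
      if d.1 == loc then ans + 1
      else loopB loc ((x :: rest).drop (j + 1) ++ (x :: rest).take j) (ans + 1) := by
  rw [loopB.eq_2]
  split
  next h =>
    have h' : PySem.List.max? ((x :: rest).map (fun y => y.2)) (fun y => y) = none := h
    rw [h'] at hmax; cases hmax
  next top h =>
    have h' : PySem.List.max? ((x :: rest).map (fun y => y.2)) (fun y => y) = some top := h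
    rw [h'] at hmax
    obtain rfl : t = top := by cases hmax; rfl
    simp only [hj, PySem.List.pyGet?_natCast, hd]
    have h1 : PySem.List.slice (x :: rest) (some ((j : Int) + 1)) none = (x :: rest).drop (j + 1) := by
      have := PySem.List.slice_from_natCast (x :: rest) (j + 1)
      simpa [Nat.cast_add] using this
    rw [h1, PySem.List.slice_to_natCast]

theorem pv_max_map (q : List (Int × Int)) (m : Int × Int)
    (hmem : m ∈ q) (hub : ∀ y ∈ q, y.2 ≤ m.2) :
    PySem.List.max? (q.map (fun y => y.2)) (fun y => y) = some m.2 := by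
  apply pv_max_id_eq
  · exact List.mem_map.2 ⟨m, hmem, rfl⟩
  · intro y hy
    rcases List.mem_map.1 hy with ⟨z, hz, rfl⟩
    exact hub z hz

theorem pv_rot (loc k v : Int) (rest : List (Int × Int)) (m : Int × Int)
    (hm : PySem.List.max? ((k, v) :: rest) (fun x => x.2) = some m)
    (hne : v ≠ m.2) (ans : Int) :
    loopB loc (rest ++ [(k, v)]) ans = loopB loc ((k, v) :: rest) ans := by
  have hmem := PySem.List.max?_mem hm
  have hub := PySem.List.max?_isMax hm
  have hmrest : m ∈ rest := by
    rcases List.mem_cons.1 hmem with h | h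
    · exact absurd (congrArg Prod.snd h.symm) (by simpa using hne)
    · exact h
  cases rest with
  | nil => cases hmrest
  | cons r0 rs =>
    have hjrlt : (r0 :: rs).findIdx (fun y => y.2 == m.2) < (r0 :: rs).length :=
      List.findIdx_lt_length.2 ⟨m, hmrest, by simp⟩
    set jr := (r0 :: rs).findIdx (fun y => y.2 == m.2) with hjrdef
    obtain ⟨d, hd⟩ : ∃ d, (r0 :: rs)[jr]? = some d :=
      ⟨(r0 :: rs)[jr]'hjrlt, List.getElem?_eq_getElem hjrlt⟩
    have hpk : ((fun y : Int × Int => y.2 == m.2) (k, v)) = false := by simpa using hne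
    have hmaxL : PySem.List.max? ((r0 :: (rs ++ [(k, v)])).map (fun y => y.2)) (fun y => y) = some m.2 := by
      have := pv_max_map ((r0 :: rs) ++ [(k, v)]) m
        (by rcases List.mem_cons.1 hmrest with h | h
            · simp [h]
            · simp [h])
        (by intro y hy
            rcases List.mem_append.1 hy with h | h
            · exact hub y (List.mem_cons_of_mem _ h)
            · simp only [List.mem_singleton] at h
              subst h
              exact hub (k, v) (by simp))
      simpa using this
    have hmaxR : PySem.List.max? (((k, v) :: r0 :: rs).map (fun y => y.2)) (fun y => y) = some m.2 :=
      pv_max_map _ m hmem hub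
    have hjL : (r0 :: (rs ++ [(k, v)])).findIdx (fun y => y.2 == m.2) = jr := by
      have : ((r0 :: rs) ++ [(k, v)]).findIdx (fun y => y.2 == m.2) = jr := by
        rw [List.findIdx_append, if_pos hjrlt]
      simpa using this
    have hdL : (r0 :: (rs ++ [(k, v)]))[jr]? = some d := by
      have : ((r0 :: rs) ++ [(k, v)])[jr]? = some d := by
        rw [List.getElem?_append_left hjrlt]; exact hd
      simpa using this
    have hjR : ((k, v) :: r0 :: rs).findIdx (fun y => y.2 == m.2) = jr + 1 := by
      rw [List.findIdx_cons]
      have : ((k, v).2 == m.2) = false := by simpa using hne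
      rw [this]; simp [hjrdef]
    have hdR : ((k, v) :: r0 :: rs)[jr + 1]? = some d := by
      simpa using hd
    rw [List.cons_append]
    rw [loopB_cons loc r0 (rs ++ [(k, v)]) ans m.2 jr d hmaxL hjL hdL,
        loopB_cons loc (k, v) (r0 :: rs) ans m.2 (jr + 1) d hmaxR hjR hdR]
    have hq : (r0 :: (rs ++ [(k, v)])).drop (jr + 1) ++ (r0 :: (rs ++ [(k, v)])).take jr
        = ((k, v) :: r0 :: rs).drop (jr + 1 + 1) ++ ((k, v) :: r0 :: rs).take (jr + 1) := by
      have hle : jr + 1 ≤ (r0 :: rs).length := hjrlt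
      have e1 : (r0 :: (rs ++ [(k, v)])).drop (jr + 1) = (r0 :: rs).drop (jr + 1) ++ [(k, v)] := by
        have := List.drop_append_of_le_length (l₁ := r0 :: rs) (l₂ := [(k, v)]) hle
        simpa using this
      have e2 : (r0 :: (rs ++ [(k, v)])).take jr = (r0 :: rs).take jr := by
        have := List.take_append_of_le_length (l₁ := r0 :: rs) (l₂ := [(k, v)]) (Nat.le_of_lt hjrlt)
        simpa using this
      rw [e1, e2]
      simp [List.take_succ_cons]
    rw [hq]

theorem loopA_cons_pop (loc k v : Int) (rest : List (Int × Int)) (ans : Int) (m : Int × Int)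
    (hm : PySem.List.max? ((k, v) :: rest) (fun x => x.2) = some m)
    (hv : (v == m.2) = true) :
    loopA loc ((k, v) :: rest) ans =
      if k == loc then ans + 1 else loopA loc rest (ans + 1) := by
  rw [loopA.eq_2]
  split
  next h =>
    have h' : PySem.List.max? ((k, v) :: rest) (fun x => x.2) = none := h
    rw [h'] at hm; cases hm
  next m' h =>
    have h' : PySem.List.max? ((k, v) :: rest) (fun x => x.2) = some m' := h
    rw [h'] at hm
    obtain rfl : m = m' := by cases hm; rfl
    rw [if_pos hv]

theorem loopA_cons_rot (loc k v : Int) (rest : List (Int × Int)) (ans : Int) (m : Int × Int)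
    (hm : PySem.List.max? ((k, v) :: rest) (fun x => x.2) = some m)
    (hv : (v == m.2) = false) :
    loopA loc ((k, v) :: rest) ans = loopA loc (rest ++ [(k, v)]) ans := by
  rw [loopA.eq_2]
  split
  next h =>
    have h' : PySem.List.max? ((k, v) :: rest) (fun x => x.2) = none := h
    rw [h'] at hm; cases hm
  next m' h =>
    have h' : PySem.List.max? ((k, v) :: rest) (fun x => x.2) = some m' := h
    rw [h'] at hm
    obtain rfl : m = m' := by cases hm; rfl
    rw [if_neg (by simp [hv])]

theorem loopA_eq_loopB (location : Int) (q : List (Int × Int)) (answer : Int) :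
    loopA location q answer = loopB location q answer := by
  induction q, answer using loopA.induct location with
  | case1 ans => rw [loopA.eq_1, loopB.eq_1]
  | case2 k v rest ans hm =>
    exact absurd ((PySem.List.max?_eq_none_iff _ _).1 hm) (by simp)
  | case3 k v rest ans m hm hv hk =>
    rw [loopA_cons_pop location k v rest ans m hm hv,
        loopB_cons location (k, v) rest ans m.2 0 (k, v)
          (pv_max_map _ m (PySem.List.max?_mem hm) (PySem.List.max?_isMax hm))
          (by rw [List.findIdx_cons]; simp only [hv]; rfl)
          (by simp)]
    simp [hk]
  | case4 k v rest ans m hm hv hk ih =>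
    rw [loopA_cons_pop location k v rest ans m hm hv,
        loopB_cons location (k, v) rest ans m.2 0 (k, v)
          (pv_max_map _ m (PySem.List.max?_mem hm) (PySem.List.max?_isMax hm))
          (by rw [List.findIdx_cons]; simp only [hv]; rfl)
          (by simp)]
    rw [if_neg (by simpa using hk), if_neg (by simpa using hk)]
    simpa using ih
  | case5 k v rest ans m hm hv ih =>
    rw [loopA_cons_rot location k v rest ans m hm (by simpa using hv), ih]
    exact pv_rot location k v rest m hm (by simpa using hv) ans

-- ===== VERDICT (by name: the statement is the Claim_ definition above) =====
theorem solution_spec : Claim_equal_solution := by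
  intro priorities location _
  unfold Spec_solution solution solution_alt
  exact loopA_eq_loopB location _ 0
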